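-- pv_equiv track=rewrite | github.com/bogdanvasile/coins | coins_ranked.py | get_exchange_listings
-- ===== SOURCE A (Python) =====
-- def get_exchange_listings(markets):
--     """Create a mapping of coins to their exchange listings."""
--     coin_listings = {}
--
--     for market in markets:
--         base_symbol = market.get("baseSymbol", "").upper()
--         exchange_id = market.get("exchangeId", "").lower()
--
--         if base_symbol and exchange_id:
--             if base_symbol not in coin_listings:
--                 coin_listings[base_symbol] = set()
--             coin_listings[base_symbol].add(exchange_id)
--
--     return coin_listings
-- ===== SOURCE B (Python) =====
-- def get_exchange_listings(markets):
--     """Create a mapping of coins to their exchange listings (filter-then-group)."""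
--     pairs = [(m.get("baseSymbol", "").upper(), m.get("exchangeId", "").lower())
--              for m in markets]
--     pairs = [(b, e) for b, e in pairs if b and e]
--     bases = list(dict.fromkeys(b for b, _ in pairs))
--     return {b: set(e for pb, e in pairs if pb == b) for b in bases}
-- ===== Notes on version B (the rewrite author's own statement) =====
-- stated objective: alternative
-- what changed: Replaced the incremental dict-of-sets maintenance (membership test + in-place set.add per market) with a filter-then-group pipeline: normalize and filter all pairs once, dedup the base symbols, then build each group by a per-key scan.
import Mathlib
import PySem

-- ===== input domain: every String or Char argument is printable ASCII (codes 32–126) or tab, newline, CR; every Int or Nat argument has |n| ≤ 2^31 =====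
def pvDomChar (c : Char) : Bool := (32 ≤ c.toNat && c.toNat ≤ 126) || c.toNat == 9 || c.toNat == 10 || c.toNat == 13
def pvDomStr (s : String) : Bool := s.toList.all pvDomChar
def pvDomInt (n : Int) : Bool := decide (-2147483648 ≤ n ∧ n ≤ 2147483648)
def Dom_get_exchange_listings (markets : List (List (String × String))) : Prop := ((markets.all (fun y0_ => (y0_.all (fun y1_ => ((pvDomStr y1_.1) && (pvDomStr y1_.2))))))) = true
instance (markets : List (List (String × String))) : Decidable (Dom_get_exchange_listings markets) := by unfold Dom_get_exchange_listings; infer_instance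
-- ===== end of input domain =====

-- B replaces A's incremental dict-of-sets maintenance with a filter-then-group pipeline (alternative decomposition, similar cost).


-- ===== PORT A =====
-- loop body of A: normalize the two fields, and on nonempty values ensure the
-- key exists (insert empty set) and add the exchange id to its set
def glStepA (d : PySem.Dict String (PySem.Set String)) (m : List (String × String)) :
    PySem.Dict String (PySem.Set String) :=
  let base_symbol := PySem.Str.upper ((PySem.Dict.mk m).getD "baseSymbol" "")
  let exchange_id := PySem.Str.lower ((PySem.Dict.mk m).getD "exchangeId" "")
  if base_symbol ≠ "" ∧ exchange_id ≠ "" then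
    let d1 := if d.contains base_symbol then d else d.insert base_symbol PySem.Set.empty
    d1.modify base_symbol PySem.Set.empty (fun s => PySem.Set.add s exchange_id)
  else d

def get_exchange_listings (markets : List (List (String × String))) : List (String × List String) :=
  (markets.foldl glStepA PySem.Dict.empty).items

-- ===== PORT B =====
def get_exchange_listings_alt (markets : List (List (String × String))) : List (String × List String) :=
  let pairs := markets.map (fun m =>
    (PySem.Str.upper ((PySem.Dict.mk m).getD "baseSymbol" ""),
     PySem.Str.lower ((PySem.Dict.mk m).getD "exchangeId" "")))
  let pairs := pairs.filter (fun p => p.1 != "" && p.2 != "")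
  let bases := PySem.List.dedup (pairs.map (·.1))
  bases.map (fun b => (b, PySem.Set.ofList ((pairs.filter (fun p => p.1 == b)).map (·.2))))

-- ===== PRECONDITION & SPEC =====
def Spec_get_exchange_listings (markets : List (List (String × String))) (out : List (String × List String)) : Prop := out = get_exchange_listings_alt markets
instance (markets : List (List (String × String))) (out : List (String × List String)) : Decidable (Spec_get_exchange_listings markets out) := by unfold Spec_get_exchange_listings; infer_instance

-- ===== CLAIM (what is proved, stated in full; the proofs are below) =====
def Claim_equal_get_exchange_listings : Prop := ∀ (markets : List (List (String × String))), Dom_get_exchange_listings markets → Spec_get_exchange_listings markets (get_exchange_listings markets)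

-- ===== LEMMAS AND PROOFS =====

-- the guarded step over a normalized pair: A's loop body rewritten with setdefault
def glStepP (d : PySem.Dict String (PySem.Set String)) (p : String × String) :
    PySem.Dict String (PySem.Set String) :=
  (d.setdefault p.1 PySem.Set.empty).modify p.1 PySem.Set.empty (fun s => PySem.Set.add s p.2)

theorem glStepA_eq (d : PySem.Dict String (PySem.Set String)) (m : List (String × String)) :
    glStepA d m =
      (if (PySem.Str.upper ((PySem.Dict.mk m).getD "baseSymbol" "")) != "" &&
          (PySem.Str.lower ((PySem.Dict.mk m).getD "exchangeId" "")) != "" then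
        glStepP d (PySem.Str.upper ((PySem.Dict.mk m).getD "baseSymbol" ""),
                   PySem.Str.lower ((PySem.Dict.mk m).getD "exchangeId" ""))
      else d) := by
  simp only [glStepA, glStepP]
  set bs := PySem.Str.upper ((PySem.Dict.mk m).getD "baseSymbol" "") with hbs
  set ex := PySem.Str.lower ((PySem.Dict.mk m).getD "exchangeId" "") with hex
  by_cases h1 : bs = ""
  · simp [h1]
  by_cases h2 : ex = ""
  · simp [h1, h2]
  have hb : (bs != "" && ex != "") = true := by
    rw [Bool.and_eq_true, bne_iff_ne, bne_iff_ne]; exact ⟨h1, h2⟩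
  rw [if_pos ⟨h1, h2⟩, if_pos hb]
  by_cases hc : d.contains bs
  · rw [if_pos hc, PySem.Dict.setdefault_of_contains _ _ hc]
  · have hcf : d.contains bs = false := by
      have := hc; rwa [Bool.not_eq_true] at this
    rw [if_neg hc, PySem.Dict.setdefault_of_not_contains _ _ hcf]

theorem glKeysStep (d : PySem.Dict String (PySem.Set String)) (p : String × String) :
    (glStepP d p).keys = PySem.Set.add d.keys p.1 := by
  unfold glStepP
  rw [PySem.Dict.keys_modify,
    PySem.Dict.keys_insert_of_contains _ _ (by simp [PySem.Dict.contains_setdefault]),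
    PySem.Dict.keys_setdefault]
  by_cases hc : d.contains p.1
  · have : p.1 ∈ d.keys := (PySem.Dict.contains_iff_mem_keys d p.1).1 hc
    simp [hc, PySem.Set.add, this]
  · have : p.1 ∉ d.keys := fun h => hc ((PySem.Dict.contains_iff_mem_keys d p.1).2 h)
    simp [hc, PySem.Set.add, this]

theorem glKeys (l : List (String × String)) (d : PySem.Dict String (PySem.Set String)) :
    (l.foldl glStepP d).keys = PySem.Set.update d.keys (l.map (·.1)) := by
  induction l generalizing d with
  | nil => simp [PySem.Set.update]
  | cons p l ih =>
      simp only [List.foldl_cons, List.map_cons, ih, glKeysStep, PySem.Set.update]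

theorem glNodup (l : List (String × String)) (d : PySem.Dict String (PySem.Set String))
    (h : d.keys.Nodup) : (l.foldl glStepP d).keys.Nodup := by
  induction l generalizing d with
  | nil => exact h
  | cons p l ih =>
      apply ih
      rw [glKeysStep]
      exact PySem.Set.nodup_add _ _ h

theorem glGetD (l : List (String × String)) (d : PySem.Dict String (PySem.Set String)) (b : String) :
    (l.foldl glStepP d).getD b PySem.Set.empty =
      PySem.Set.update (d.getD b PySem.Set.empty) ((l.filter (fun p => p.1 == b)).map (·.2)) := by
  induction l generalizing d with
  | nil => simp [PySem.Set.update]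
  | cons p l ih =>
      simp only [List.foldl_cons, ih, List.filter_cons]
      by_cases hb : p.1 = b
      · subst hb
        simp only [beq_self_eq_true, if_pos, List.map_cons, PySem.Set.update, List.foldl_cons]
        congr 2
        unfold glStepP
        rw [PySem.Dict.getD_modify_self, PySem.Dict.getD_setdefault_self]
      · have hbb : (p.1 == b) = false := by simp [hb]
        simp only [hbb, Bool.false_eq_true, if_false]
        congr 1
        unfold glStepP
        rw [PySem.Dict.getD_modify_of_ne _ _ _ (fun h => hb h.symm),
          PySem.Dict.getD_eq_get?_getD, PySem.Dict.get?_setdefault_of_ne _ _ (fun h => hb h.symm),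
          ← PySem.Dict.getD_eq_get?_getD]

theorem gl_main (markets : List (List (String × String))) :
    get_exchange_listings markets = get_exchange_listings_alt markets := by
  unfold get_exchange_listings get_exchange_listings_alt
  simp only []
  have hmap : markets.foldl glStepA PySem.Dict.empty =
      ((markets.map (fun m =>
        (PySem.Str.upper ((PySem.Dict.mk m).getD "baseSymbol" ""),
         PySem.Str.lower ((PySem.Dict.mk m).getD "exchangeId" "")))).filter
          (fun p => p.1 != "" && p.2 != "")).foldl glStepP PySem.Dict.empty := by
    rw [List.foldl_filter, List.foldl_map]
    exact PySem.List.foldl_congr_mem _ _ _ _ (fun acc m _ => glStepA_eq acc m)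
  rw [hmap]
  set l := ((markets.map (fun m =>
        (PySem.Str.upper ((PySem.Dict.mk m).getD "baseSymbol" ""),
         PySem.Str.lower ((PySem.Dict.mk m).getD "exchangeId" "")))).filter
          (fun p => p.1 != "" && p.2 != "")) with hl
  have hnd : (l.foldl glStepP PySem.Dict.empty).keys.Nodup := by
    apply glNodup
    simp [PySem.Dict.keys_empty]
  rw [PySem.Dict.items_eq_map_keys _ hnd PySem.Set.empty, glKeys]
  rw [PySem.Dict.keys_empty, PySem.Set.update_nil_left, ← PySem.List.dedup_eq_ofList]
  apply List.map_congr_left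
  intro b _
  rw [glGetD, PySem.Dict.getD_empty]
  simp only [PySem.Set.empty, PySem.Set.update_nil_left]

-- ===== VERDICT (by name: the statement is the Claim_ definition above) =====
theorem get_exchange_listings_spec : Claim_equal_get_exchange_listings := by
  intro markets _
  exact gl_main markets
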